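-- pv_equiv track=rewrite | github.com/peterjohn1298/CreditMind | core/document_processor.py | _extract_cim_section
-- ===== SOURCE A (Python) =====
-- from typing import Optional
--
-- def _extract_cim_section(text: str, section_markers: list, max_chars: int = 8000) -> Optional[str]:
--     """Extract a specific section from CIM full text by marker keywords."""
--     lower = text.lower()
--     best_pos = -1
--     for marker in section_markers:
--         pos = lower.find(marker.lower())
--         if pos != -1 and (best_pos == -1 or pos < best_pos):
--             best_pos = pos
--     if best_pos == -1:
--         return None
--     start = max(0, best_pos - 100)
--     return text[start:start + max_chars]
-- ===== SOURCE B (Python) =====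
-- import re
--
-- def _extract_cim_section(text: str, section_markers: list, max_chars: int = 8000):
--     """Extract a specific section from CIM full text by marker keywords."""
--     if not section_markers:
--         return None
--     lowered = text.lower()
--     pattern = "|".join(re.escape(m.lower()) for m in section_markers)
--     match = re.search(pattern, lowered)
--     if match is None:
--         return None
--     start = max(0, match.start() - 100)
--     return text[start:start + max_chars]
-- ===== Notes on version B (the rewrite author's own statement) =====
-- stated objective: faster
-- what changed: Guards the empty-marker list, lowercases text once and runs one re.search over an alternation of the re.escape'd lowered markers, so a single C-level regex pass returns the leftmost match over all markers at once instead of k separate str.find scans combined by a manual running minimum.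
import Mathlib
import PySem

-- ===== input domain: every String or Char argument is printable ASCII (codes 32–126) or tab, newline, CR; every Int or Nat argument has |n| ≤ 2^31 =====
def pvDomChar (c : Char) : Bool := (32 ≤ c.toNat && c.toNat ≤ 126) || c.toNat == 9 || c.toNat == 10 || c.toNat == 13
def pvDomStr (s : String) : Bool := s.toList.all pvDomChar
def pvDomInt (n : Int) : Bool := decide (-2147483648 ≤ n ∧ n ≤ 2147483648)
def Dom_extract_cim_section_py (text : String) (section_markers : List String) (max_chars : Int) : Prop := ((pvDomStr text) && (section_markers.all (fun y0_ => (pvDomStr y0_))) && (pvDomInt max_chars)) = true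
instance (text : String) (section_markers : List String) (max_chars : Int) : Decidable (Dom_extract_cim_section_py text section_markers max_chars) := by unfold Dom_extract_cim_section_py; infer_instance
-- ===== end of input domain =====

-- ===== PORT A =====

-- B guards the empty-marker case, then finds the leftmost match of all markers at
-- once with one re.search over an alternation of the re.escape'd lowered markers,
-- instead of A's k separate str.find scans with a manual running minimum.

-- ===== PORT A =====
def extract_cim_section_py (text : String) (section_markers : List String) (max_chars : Int) : Option String :=
  let lower := PySem.Chars.lower text.toList
  let best_pos : Int := section_markers.foldl
    (fun best_pos marker =>
      let pos := PySem.Chars.find lower (PySem.Chars.lower marker.toList)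
      if pos ≠ -1 ∧ (best_pos = -1 ∨ pos < best_pos) then pos else best_pos)
    (-1)
  if best_pos = -1 then none
  else
    let start := max 0 (best_pos - 100)
    some (String.ofList (PySem.List.slice text.toList (some start) (some (start + max_chars))))

-- ===== PORT B =====
-- re.search over an alternation of re.escape'd LITERAL needles returns the leftmost
-- match: the smallest position where some needle starts. PySem has no regex, so that
-- library call is ported by hand the way the regex engine runs it: try each position
-- left to right, at each position try each alternative (pvHit), stop at the first hit.
-- Exact: 'needle starts at pos in lowered' is PySem.Chars.startswith (lowered.drop pos) n.
def pvHit (lowered : List Char) (needles : List (List Char)) (pos : Nat) : Bool :=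
  needles.any (fun n => PySem.Chars.startswith (lowered.drop pos) n)

-- the engine's position loop; fuel = number of remaining candidate positions
def pvScan (lowered : List Char) (needles : List (List Char)) : Nat → Nat → Option Nat
  | _, 0 => none
  | pos, fuel + 1 =>
    if pvHit lowered needles pos then some pos
    else pvScan lowered needles (pos + 1) fuel

def extract_cim_section_py_alt (text : String) (section_markers : List String) (max_chars : Int) : Option String :=
  if section_markers.isEmpty then none
  else
    let lowered := PySem.Chars.lower text.toList
    let needles := section_markers.map (fun m => PySem.Chars.lower m.toList)
    match pvScan lowered needles 0 (text.toList.length + 1) with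
    | none => none
    | some best_pos =>
      let start := max 0 ((best_pos : Int) - 100)
      some (String.ofList (PySem.List.slice text.toList (some start) (some (start + max_chars))))

-- ===== PRECONDITION & SPEC =====
def Spec_extract_cim_section_py (text : String) (section_markers : List String) (max_chars : Int) (out : Option String) : Prop := out = extract_cim_section_py_alt text section_markers max_chars
instance (text : String) (section_markers : List String) (max_chars : Int) (out : Option String) : Decidable (Spec_extract_cim_section_py text section_markers max_chars out) := by unfold Spec_extract_cim_section_py; infer_instance

-- ===== CLAIM (what is proved, stated in full; the proofs are below) =====
def Claim_equal_extract_cim_section_py : Prop := ∀ (text : String) (section_markers : List String) (max_chars : Int), Dom_extract_cim_section_py text section_markers max_chars → Spec_extract_cim_section_py text section_markers max_chars (extract_cim_section_py text section_markers max_chars)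

-- ===== LEMMAS AND PROOFS =====

-- proof-only abbreviations, definitionally equal to the bodies of the two ports
def pvF (L : List Char) (m : String) : Int := PySem.Chars.find L (PySem.Chars.lower m.toList)

def pvStep (L : List Char) (best_pos : Int) (marker : String) : Int :=
  if pvF L marker ≠ -1 ∧ (best_pos = -1 ∨ pvF L marker < best_pos) then pvF L marker else best_pos

theorem pvF_ge (L : List Char) (m : String) : -1 ≤ pvF L m :=
  PySem.Chars.neg_one_le_find L (PySem.Chars.lower m.toList)

theorem pvHit_iff (L : List Char) (N : List (List Char)) (p : Nat) :
    pvHit L N p = true ↔ ∃ n ∈ N, n <+: L.drop p := by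
  simp [pvHit, List.any_eq_true, PySem.Chars.startswith_iff]

theorem pvScan_eq_none_iff (L : List Char) (N : List (List Char)) (fuel pos : Nat) :
    pvScan L N pos fuel = none ↔ ∀ i, pos ≤ i → i < pos + fuel → pvHit L N i = false := by
  induction fuel generalizing pos with
  | zero => simp [pvScan]; omega
  | succ f ih =>
    simp only [pvScan]
    by_cases h : pvHit L N pos = true
    · rw [if_pos h]
      constructor
      · intro hc; exact absurd hc (by simp)
      · intro hall; have := hall pos (le_refl _) (by omega); simp [h] at this
    · rw [if_neg h, ih]
      constructor
      · intro hall i h1 h2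
        rcases eq_or_lt_of_le h1 with rfl | hlt
        · simpa using h
        · exact hall i hlt (by omega)
      · intro hall i h1 h2; exact hall i (by omega) (by omega)

theorem pvScan_eq_some_iff (L : List Char) (N : List (List Char)) (fuel pos r : Nat) :
    pvScan L N pos fuel = some r ↔
      pos ≤ r ∧ r < pos + fuel ∧ pvHit L N r = true ∧
        ∀ i, pos ≤ i → i < r → pvHit L N i = false := by
  induction fuel generalizing pos with
  | zero =>
    simp only [pvScan]
    constructor
    · intro h; exact absurd h (by simp)
    · rintro ⟨h1, h2, -⟩; omega
  | succ f ih =>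
    simp only [pvScan]
    by_cases h : pvHit L N pos = true
    · rw [if_pos h]
      simp only [Option.some.injEq]
      constructor
      · rintro rfl; exact ⟨le_refl _, by omega, h, fun i h1 h2 => by omega⟩
      · rintro ⟨h1, _, _, hmin⟩
        rcases eq_or_lt_of_le h1 with rfl | hlt
        · rfl
        · have := hmin pos (le_refl _) hlt; simp [h] at this
    · rw [if_neg h, ih]
      constructor
      · rintro ⟨h1, h2, h3, hmin⟩
        refine ⟨by omega, by omega, h3, fun i hi1 hi2 => ?_⟩
        rcases eq_or_lt_of_le hi1 with rfl | hlt
        · simpa using h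
        · exact hmin i hlt hi2
      · rintro ⟨h1, h2, h3, hmin⟩
        have hne : pos ≠ r := by rintro rfl; simp [h3] at h
        exact ⟨by omega, by omega, h3, fun i hi1 hi2 => hmin i (by omega) hi2⟩

-- characterisation of A's running-minimum foldl
theorem pvFoldA_char (L : List Char) (ms : List String) (acc : Int)
    (hacc : acc = -1 ∨ 0 ≤ acc) :
    (ms.foldl (pvStep L) acc = acc ∧ ∀ m ∈ ms, pvF L m = -1 ∨ (acc ≠ -1 ∧ acc ≤ pvF L m))
    ∨ (∃ m ∈ ms, ms.foldl (pvStep L) acc = pvF L m ∧ pvF L m ≠ -1 ∧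
        (acc = -1 ∨ pvF L m < acc) ∧
        ∀ m' ∈ ms, pvF L m' = -1 ∨ ms.foldl (pvStep L) acc ≤ pvF L m') := by
  induction ms generalizing acc with
  | nil => left; simp
  | cons m ms ih =>
    simp only [List.foldl_cons]
    have hFm1 := pvF_ge L m
    by_cases hc : pvF L m ≠ -1 ∧ (acc = -1 ∨ pvF L m < acc)
    · have hstep : pvStep L acc m = pvF L m := by unfold pvStep; rw [if_pos hc]
      rw [hstep]
      have hFm0 : 0 ≤ pvF L m := by omega
      rcases ih (pvF L m) (Or.inr hFm0) with ⟨heq, hall⟩ | ⟨m', hm', heq, hne, hlt, hmin⟩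
      · right
        refine ⟨m, by simp, heq, by omega, hc.2, ?_⟩
        intro m' hm'
        simp only [List.mem_cons] at hm'
        rcases hm' with rfl | hm'
        · right; rw [heq]
        · rcases hall m' hm' with h | h
          · left; exact h
          · right; rw [heq]; exact h.2
      · right
        have hFm'1 := pvF_ge L m'
        refine ⟨m', by simp [hm'], heq, hne, by omega, ?_⟩
        intro m'' hm''
        simp only [List.mem_cons] at hm''
        rcases hm'' with rfl | hm''
        · right; rw [heq]; omega
        · exact hmin m'' hm''
    · have hstep : pvStep L acc m = acc := by unfold pvStep; rw [if_neg hc]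
      rw [hstep]
      rcases not_and_or.mp hc with h1 | h2
      all_goals {
        rcases ih acc hacc with ⟨heq, hall⟩ | ⟨m', hm', heq, hne, hlt, hmin⟩
        · left
          refine ⟨heq, fun m' hm' => ?_⟩
          simp only [List.mem_cons] at hm'
          rcases hm' with rfl | hm'
          · by_cases hd : pvF L m' = -1
            · left; exact hd
            · right
              first
              | exact absurd hd (by simpa using h1)
              | (rcases not_or.mp h2 with ⟨ha1, ha2⟩; exact ⟨ha1, by omega⟩)
          · exact hall m' hm'
        · right
          have hFm'1 := pvF_ge L m'
          refine ⟨m', by simp [hm'], heq, hne, hlt, fun m'' hm'' => ?_⟩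
          simp only [List.mem_cons] at hm''
          rcases hm'' with rfl | hm''
          · by_cases hd : pvF L m'' = -1
            · left; exact hd
            · right
              rw [heq]
              first
              | exact absurd hd (by simpa using h1)
              | (rcases not_or.mp h2 with ⟨ha1, ha2⟩; omega)
          · exact hmin m'' hm''
      }

-- a prefix of a drop is an infix
theorem pvPrefix_drop_infix {n L : List Char} {p : Nat} (h : n <+: L.drop p) : n <:+: L :=
  h.isInfix.trans (List.drop_suffix p L).isInfix

-- ===== VERDICT (by name: the statement is the Claim_ definition above) =====
theorem extract_cim_section_py_spec : Claim_equal_extract_cim_section_py := by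
  intro text section_markers max_chars _
  unfold Spec_extract_cim_section_py
  cases hms : section_markers with
  | nil => rfl
  | cons m1 ms1 =>
  rw [← hms]
  have hA : extract_cim_section_py text section_markers max_chars =
      (if section_markers.foldl (pvStep (PySem.Chars.lower text.toList)) (-1) = -1 then none
       else
         some (String.ofList (PySem.List.slice text.toList
           (some (max 0 (section_markers.foldl (pvStep (PySem.Chars.lower text.toList)) (-1) - 100)))
           (some (max 0 (section_markers.foldl (pvStep (PySem.Chars.lower text.toList)) (-1) - 100) + max_chars))))) := rfl
  have hne0 : section_markers.isEmpty = false := by rw [hms]; rfl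
  have hB : extract_cim_section_py_alt text section_markers max_chars =
      (match pvScan (PySem.Chars.lower text.toList)
          (section_markers.map (fun m => PySem.Chars.lower m.toList)) 0 (text.toList.length + 1) with
       | none => none
       | some p =>
         some (String.ofList (PySem.List.slice text.toList
           (some (max 0 ((p : Int) - 100)))
           (some (max 0 ((p : Int) - 100) + max_chars))))) := by
    unfold extract_cim_section_py_alt
    rw [hne0]
    simp only [Bool.false_eq_true, if_false]
  rw [hA, hB]
  set L := PySem.Chars.lower text.toList with hL
  set N := section_markers.map (fun m => PySem.Chars.lower m.toList) with hN
  set r := section_markers.foldl (pvStep L) (-1) with hr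
  have hLlen : L.length = text.toList.length := by rw [hL]; simp [PySem.Chars.lower]
  rcases pvFoldA_char L section_markers (-1) (Or.inl rfl) with ⟨heq, hall⟩ | ⟨m0, hm0, heq, hne, -, hmin⟩
  · -- no marker occurs: every find is -1, and no position hits
    rw [← hr] at heq
    have hscan : pvScan L N 0 (text.toList.length + 1) = none := by
      rw [pvScan_eq_none_iff]
      intro i _ _
      cases hh : pvHit L N i with
      | false => rfl
      | true =>
        exfalso
        rw [pvHit_iff] at hh
        obtain ⟨n, hnN, hpre⟩ := hh
        rw [hN] at hnN
        simp only [List.mem_map] at hnN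
        obtain ⟨m, hm, rfl⟩ := hnN
        rcases hall m hm with hfm | hfm
        · rw [pvF, PySem.Chars.find_eq_neg_one_iff] at hfm
          exact hfm (pvPrefix_drop_infix hpre)
        · exact hfm.1 rfl
    rw [hscan, if_pos heq]
  · -- some marker occurs: the scan stops exactly at the minimal find position r
    rw [← hr] at heq hmin
    have hFge := pvF_ge L m0
    have hr0 : 0 ≤ r := by rw [heq]; omega
    have hrle : r ≤ (L.length : Int) := by
      rw [heq]; exact PySem.Chars.find_le_length L (PySem.Chars.lower m0.toList)
    have hspec := PySem.Chars.find_spec (s := L) (sub := PySem.Chars.lower m0.toList) (by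
      show (0 : Int) ≤ pvF L m0; omega)
    have hrnat : (PySem.Chars.find L (PySem.Chars.lower m0.toList)).toNat = r.toNat := by
      rw [heq]; rfl
    have hscan : pvScan L N 0 (text.toList.length + 1) = some r.toNat := by
      rw [pvScan_eq_some_iff]
      refine ⟨Nat.zero_le _, by omega, ?_, ?_⟩
      · rw [pvHit_iff]
        refine ⟨PySem.Chars.lower m0.toList, ?_, ?_⟩
        · rw [hN]; simp only [List.mem_map]; exact ⟨m0, hm0, rfl⟩
        · rw [← hrnat]; exact hspec.1
      · intro i _ hi
        cases hh : pvHit L N i with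
        | false => rfl
        | true =>
          exfalso
          rw [pvHit_iff] at hh
          obtain ⟨n, hnN, hpre⟩ := hh
          rw [hN] at hnN
          simp only [List.mem_map] at hnN
          obtain ⟨m, hm, rfl⟩ := hnN
          have hinf : PySem.Chars.lower m.toList <:+: L := pvPrefix_drop_infix hpre
          have hFm : pvF L m ≠ -1 := by
            rw [pvF]
            exact (PySem.Chars.find_ne_neg_one_iff L (PySem.Chars.lower m.toList)).mpr hinf
          have hrleF : r ≤ pvF L m := by
            rcases hmin m hm with h | h
            · exact absurd h hFm
            · exact h
          have hFm0 : (0 : Int) ≤ pvF L m := by have := pvF_ge L m; omega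
          have hspecm := PySem.Chars.find_spec (s := L) (sub := PySem.Chars.lower m.toList) hFm0
          refine hspecm.2 i ?_ hpre
          show i < (pvF L m).toNat
          omega
    rw [hscan]
    have hrne : ¬ (r = -1) := by omega
    rw [if_neg hrne]
    simp only [Int.toNat_of_nonneg hr0]
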